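-- pv_equiv track=rewrite | github.com/ivobog/bookmaker-mistake-detector | backend/src/bookmaker_detector_api/data_quality_taxonomy.py | issue_type_filter_variants
-- ===== SOURCE A (Python) =====
-- LEGACY_ISSUE_TYPE_ALIASES = {
--     "single_team_perspective_only": "canonical.single_team_perspective_only",
--     "score_mismatch": "canonical.score_mismatch",
--     "total_line_mismatch": "canonical.total_line_mismatch",
--     "spread_line_mismatch": "canonical.spread_line_mismatch",
-- }
--
-- def canonical_issue_type(issue_type: str) -> str:
--     return LEGACY_ISSUE_TYPE_ALIASES.get(issue_type, issue_type)
--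
-- def issue_type_filter_variants(issue_type: str) -> set[str]:
--     normalized_issue_type = canonical_issue_type(issue_type)
--     variants = {normalized_issue_type}
--     variants.update(
--         legacy_issue_type
--         for legacy_issue_type, canonical_name in LEGACY_ISSUE_TYPE_ALIASES.items()
--         if canonical_name == normalized_issue_type
--     )
--     return variants
-- ===== SOURCE B (Python) =====
-- LEGACY_ISSUE_TYPE_ALIASES = {
--     "single_team_perspective_only": "canonical.single_team_perspective_only",
--     "score_mismatch": "canonical.score_mismatch",
--     "total_line_mismatch": "canonical.total_line_mismatch",
--     "spread_line_mismatch": "canonical.spread_line_mismatch",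
-- }
--
-- # Reverse index built once: canonical name -> set of legacy aliases.
-- _REVERSE_ALIASES = {}
-- for _legacy, _canonical in LEGACY_ISSUE_TYPE_ALIASES.items():
--     _REVERSE_ALIASES.setdefault(_canonical, set()).add(_legacy)
--
--
-- def issue_type_filter_variants(issue_type: str) -> set[str]:
--     normalized = LEGACY_ISSUE_TYPE_ALIASES.get(issue_type, issue_type)
--     return {normalized} | _REVERSE_ALIASES.get(normalized, set())
-- ===== Notes on version B (the rewrite author's own statement) =====
-- stated objective: alternative
-- what changed: Replaces the per-call filtering comprehension over the alias table by a reverse index (canonical -> set of legacy keys) built once at module load, so each call is a normalization plus one dict lookup and a set union.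
import Mathlib
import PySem

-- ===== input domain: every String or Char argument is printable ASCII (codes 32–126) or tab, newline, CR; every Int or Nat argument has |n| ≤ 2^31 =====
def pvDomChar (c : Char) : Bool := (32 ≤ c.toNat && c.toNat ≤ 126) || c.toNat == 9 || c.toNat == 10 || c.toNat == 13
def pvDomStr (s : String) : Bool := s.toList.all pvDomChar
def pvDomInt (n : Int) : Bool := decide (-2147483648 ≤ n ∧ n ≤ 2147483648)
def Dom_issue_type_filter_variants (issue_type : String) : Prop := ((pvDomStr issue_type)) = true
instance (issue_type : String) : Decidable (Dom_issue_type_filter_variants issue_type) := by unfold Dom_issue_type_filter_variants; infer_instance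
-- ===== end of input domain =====

-- B replaces A's per-call filtering scan of the alias table by a precomputed reverse
-- index (canonical name -> set of legacy keys) consulted with a single lookup.

-- ===== PORT A =====
def pvAliases : PySem.Dict String String :=
  PySem.Dict.ofList
    [ ("single_team_perspective_only", "canonical.single_team_perspective_only"),
      ("score_mismatch", "canonical.score_mismatch"),
      ("total_line_mismatch", "canonical.total_line_mismatch"),
      ("spread_line_mismatch", "canonical.spread_line_mismatch") ]

def canonical_issue_type (issue_type : String) : String :=
  PySem.Dict.getD pvAliases issue_type issue_type

def issue_type_filter_variants (issue_type : String) : List String :=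
  let normalized := canonical_issue_type issue_type
  let variants : PySem.Set String := PySem.Set.ofList [normalized]
  (PySem.Dict.items pvAliases).foldl
    (fun v kv => if kv.2 == normalized then PySem.Set.add v kv.1 else v) variants

-- ===== PORT B =====
def pvReverseAliases : PySem.Dict String (PySem.Set String) :=
  (PySem.Dict.items pvAliases).foldl
    (fun r kv => PySem.Dict.modify r kv.2 PySem.Set.empty (fun s => PySem.Set.add s kv.1))
    PySem.Dict.empty

def issue_type_filter_variants_alt (issue_type : String) : List String :=
  let normalized := PySem.Dict.getD pvAliases issue_type issue_type
  PySem.Set.union (PySem.Set.ofList [normalized])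
    (PySem.Dict.getD pvReverseAliases normalized PySem.Set.empty)

-- ===== PRECONDITION & SPEC =====
def Spec_issue_type_filter_variants (issue_type : String) (out : List String) : Prop := out = issue_type_filter_variants_alt issue_type
instance (issue_type : String) (out : List String) : Decidable (Spec_issue_type_filter_variants issue_type out) := by unfold Spec_issue_type_filter_variants; infer_instance

-- ===== CLAIM (what is proved, stated in full; the proofs are below) =====
def Claim_equal_issue_type_filter_variants : Prop := ∀ (issue_type : String), Dom_issue_type_filter_variants issue_type → Spec_issue_type_filter_variants issue_type (issue_type_filter_variants issue_type)

-- ===== LEMMAS AND PROOFS =====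

-- On a string that is neither a legacy key nor a canonical name, both ports return [s].
theorem pv_generic (s : String)
    (h1 : s ≠ "single_team_perspective_only") (h2 : s ≠ "score_mismatch")
    (h3 : s ≠ "total_line_mismatch") (h4 : s ≠ "spread_line_mismatch")
    (h5 : s ≠ "canonical.single_team_perspective_only") (h6 : s ≠ "canonical.score_mismatch")
    (h7 : s ≠ "canonical.total_line_mismatch") (h8 : s ≠ "canonical.spread_line_mismatch") :
    issue_type_filter_variants s = issue_type_filter_variants_alt s := by
  have e1 : ("single_team_perspective_only" == s) = false := beq_eq_false_iff_ne.mpr (Ne.symm h1)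
  have e2 : ("score_mismatch" == s) = false := beq_eq_false_iff_ne.mpr (Ne.symm h2)
  have e3 : ("total_line_mismatch" == s) = false := beq_eq_false_iff_ne.mpr (Ne.symm h3)
  have e4 : ("spread_line_mismatch" == s) = false := beq_eq_false_iff_ne.mpr (Ne.symm h4)
  have e5 : ("canonical.single_team_perspective_only" == s) = false := beq_eq_false_iff_ne.mpr (Ne.symm h5)
  have e6 : ("canonical.score_mismatch" == s) = false := beq_eq_false_iff_ne.mpr (Ne.symm h6)
  have e7 : ("canonical.total_line_mismatch" == s) = false := beq_eq_false_iff_ne.mpr (Ne.symm h7)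
  have e8 : ("canonical.spread_line_mismatch" == s) = false := beq_eq_false_iff_ne.mpr (Ne.symm h8)
  simp [issue_type_filter_variants, issue_type_filter_variants_alt, canonical_issue_type,
    pvAliases, pvReverseAliases, PySem.Dict.ofList, PySem.Dict.update, PySem.Dict.getD,
    PySem.Dict.get?, PySem.Dict.insert, PySem.Dict.contains, PySem.Dict.empty, PySem.Dict.modify,
    PySem.Set.add, PySem.Set.union, PySem.Set.update, PySem.Set.ofList, PySem.Set.empty,
    PySem.Set.contains, List.foldl, List.find?,
    e1, e2, e3, e4, e5, e6, e7, e8, Ne.symm h5, Ne.symm h6, Ne.symm h7, Ne.symm h8]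

-- ===== VERDICT (by name: the statement is the Claim_ definition above) =====
theorem issue_type_filter_variants_spec : Claim_equal_issue_type_filter_variants := by
  intro s _
  unfold Spec_issue_type_filter_variants
  by_cases h1 : s = "single_team_perspective_only"; · subst h1; decide
  by_cases h2 : s = "score_mismatch"; · subst h2; decide
  by_cases h3 : s = "total_line_mismatch"; · subst h3; decide
  by_cases h4 : s = "spread_line_mismatch"; · subst h4; decide
  by_cases h5 : s = "canonical.single_team_perspective_only"; · subst h5; decide
  by_cases h6 : s = "canonical.score_mismatch"; · subst h6; decide
  by_cases h7 : s = "canonical.total_line_mismatch"; · subst h7; decide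
  by_cases h8 : s = "canonical.spread_line_mismatch"; · subst h8; decide
  exact pv_generic s h1 h2 h3 h4 h5 h6 h7 h8
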